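-- pv_equiv track=rewrite | github.com/Heyukim/d1_python | d1_workspace_client/src/d1_workspace/workspace_solr_client.py | _escape_query_term
-- ===== SOURCE A (Python) =====
-- def _escape_query_term(term):
--   reserved = [
--     '+',
--     '-',
--     '&',
--     '|',
--     '!',
--     '(',
--     ')',
--     '{',
--     '}',
--     '[',
--     ']',
--     '^',
--     '"',
--     '~',
--     '*',
--     '?',
--     ':',
--   ]
--   term = term.replace(u'\\', u'\\\\')
--   for c in reserved:
--     term = term.replace(c, u'\{0}'.format(c))
--   return term
-- ===== SOURCE B (Python) =====
-- # B: single pass with a membership set instead of 18 whole-string replace scans.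
-- _ESCAPE_CHARS = set('\\+-&|!(){}[]^"~*?:')
--
--
-- def _escape_query_term(term):
--   return ''.join('\\' + c if c in _ESCAPE_CHARS else c for c in term)
-- ===== Notes on version B (the rewrite author's own statement) =====
-- stated objective: idiomatic
-- what changed: Replaces A's 18 sequential whole-string str.replace passes (backslash first, then each reserved character) by a single traversal that joins '\'+c for characters in one precomputed escape set and c otherwise.
import Mathlib
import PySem

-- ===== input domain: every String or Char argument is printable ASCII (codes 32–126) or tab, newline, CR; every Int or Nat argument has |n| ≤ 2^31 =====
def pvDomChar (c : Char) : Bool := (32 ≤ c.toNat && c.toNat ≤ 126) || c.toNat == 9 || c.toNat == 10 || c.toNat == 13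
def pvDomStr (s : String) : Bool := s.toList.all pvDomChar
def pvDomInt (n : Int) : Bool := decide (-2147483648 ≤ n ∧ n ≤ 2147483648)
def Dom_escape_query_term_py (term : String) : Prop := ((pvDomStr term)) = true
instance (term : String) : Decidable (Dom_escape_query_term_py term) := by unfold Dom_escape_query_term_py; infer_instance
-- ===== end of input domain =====

-- B replaces A's 18 sequential whole-string replace passes by one single-pass traversal with an escape set (idiomatic single pass; no speed claim).


-- ===== PORT A =====
-- A: escape backslash first, then run one whole-string replace per reserved character.
def reserved_py : List String :=
  ["+", "-", "&", "|", "!", "(", ")", "{", "}", "[", "]", "^", "\"", "~", "*", "?", ":"]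

def escape_query_term_py (term : String) : String :=
  let term := PySem.Str.replace term "\\" "\\\\"
  reserved_py.foldl (fun t c => PySem.Str.replace t c ("\\" ++ c)) term

-- ===== PORT B =====
-- B: one pass; each character in the escape set is emitted as '\' + c, others unchanged.
def escChars : List Char :=
  ['\\', '+', '-', '&', '|', '!', '(', ')', '{', '}', '[', ']', '^', '"', '~', '*', '?', ':']

def escape_query_term_py_alt (term : String) : String :=
  String.ofList (term.toList.flatMap (fun c => if escChars.contains c then ['\\', c] else [c]))

-- ===== PRECONDITION & SPEC =====
def Spec_escape_query_term_py (term : String) (out : String) : Prop := out = escape_query_term_py_alt term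
instance (term : String) (out : String) : Decidable (Spec_escape_query_term_py term out) := by unfold Spec_escape_query_term_py; infer_instance

-- ===== CLAIM (what is proved, stated in full; the proofs are below) =====
def Claim_equal_escape_query_term_py : Prop := ∀ (term : String), Dom_escape_query_term_py term → Spec_escape_query_term_py term (escape_query_term_py term)

-- ===== LEMMAS AND PROOFS =====

-- per-character effect of one single-char replace step
def esc1 (a c : Char) : List Char := if c = a then ['\\', a] else [c]

theorem go_single (a : Char) : ∀ (l : List Char) (fuel : Nat) (acc : List Char),
    l.length ≤ fuel →
    PySem.Chars.replace.go [a] ['\\', a] fuel l acc = acc.reverse ++ l.flatMap (esc1 a) := by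
  intro l
  induction l with
  | nil =>
    intro fuel acc h
    cases fuel <;> simp [PySem.Chars.replace.go]
  | cons c t ih =>
    intro fuel acc h
    cases fuel with
    | zero => simp at h
    | succ f =>
      simp only [PySem.Chars.replace.go]
      by_cases hc : c = a
      · subst hc
        simp only [List.isPrefixOf, BEq.rfl, Bool.and_self, if_true, List.length_cons,
          List.drop_succ_cons, List.reverse_cons, List.reverse_nil,
          List.nil_append, List.length_nil, List.drop_zero]
        rw [ih f _ (by simpa using h)]
        simp [esc1]
      · rw [ih f _ (by simpa using h)]
        simp [List.isPrefixOf, esc1, hc, Ne.symm hc]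

theorem replace_single (a : Char) (s : List Char) :
    PySem.Chars.replace s [a] ['\\', a] = s.flatMap (esc1 a) := by
  simp [PySem.Chars.replace, go_single a s s.length [] le_rfl]

-- A's pipeline over the character list, as a fold of per-character flatMaps
theorem A_chars (term : String) :
    (escape_query_term_py term).toList =
      escChars.foldl (fun s a => s.flatMap (esc1 a)) term.toList := by
  simp only [escape_query_term_py, reserved_py, escChars, List.foldl]
  simp [PySem.Str.toList_replace, replace_single]

-- a fold of flatMaps factors through each character of the start string
theorem fold_step (L : List Char) : ∀ (s : List Char),
    L.foldl (fun s a => s.flatMap (esc1 a)) s =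
      s.flatMap (fun c => L.foldl (fun b a => b.flatMap (esc1 a)) [c]) := by
  induction L with
  | nil => intro s; simp
  | cons a L ih =>
    intro s
    simp only [List.foldl_cons]
    rw [ih (s.flatMap (esc1 a)), List.flatMap_assoc]
    refine List.flatMap_congr (fun c _ => ?_)
    rw [ih (List.flatMap (esc1 a) [c])]
    simp

-- characters a block contains no occurrence of pass through a fold unchanged
theorem block_skip (a : Char) (b : List Char) (h : a ∉ b) : b.flatMap (esc1 a) = b := by
  induction b with
  | nil => simp
  | cons c t ih =>
    simp only [List.mem_cons, not_or] at h
    simp [esc1, Ne.symm h.1, ih h.2]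

theorem fold_fixed (L : List Char) : ∀ (b : List Char), (∀ a ∈ L, a ∉ b) →
    L.foldl (fun b a => b.flatMap (esc1 a)) b = b := by
  induction L with
  | nil => intro b _; rfl
  | cons a L ih =>
    intro b h
    simp only [List.foldl_cons]
    rw [block_skip a b (h a (by simp)), ih b (fun x hx => h x (by simp [hx]))]

-- per-character value of A's whole fold equals B's per-character rule
theorem phi_char (c : Char) :
    escChars.foldl (fun b a => b.flatMap (esc1 a)) [c] =
      (if escChars.contains c then ['\\', c] else [c]) := by
  by_cases h : c ∈ escChars
  · fin_cases h <;> rfl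
  · rw [fold_fixed escChars [c]
      (fun a ha => by simp only [List.mem_singleton]; rintro rfl; exact h ha)]
    simp [h]

-- ===== VERDICT (by name: the statement is the Claim_ definition above) =====
theorem escape_query_term_py_spec : Claim_equal_escape_query_term_py := by
  intro term _
  show escape_query_term_py term = escape_query_term_py_alt term
  apply String.toList_inj.mp
  rw [A_chars, fold_step, escape_query_term_py_alt]
  rw [String.toList_ofList]
  exact List.flatMap_congr (fun c _ => phi_char c)
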